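-- pv_equiv track=rewrite | github.com/itsXactlY/DayZ-Usefull-Tools-Mods-Addons-Trallala | Machine_Learning_Loot_Gear_Balancer.py | validate_analysis_structure
-- ===== SOURCE A (Python) =====
-- from typing import Dict, List, Optional
--
-- def validate_analysis_structure(analysis: Dict) -> bool:
--     """Validate analysis results structure and values"""
--     required_keys = ['tier', 'nominal', 'min']
--
--     if not all(key in analysis for key in required_keys):
--         return False
--
--     try:
--         tier = int(analysis['tier'])
--         nominal = int(analysis['nominal'])
--         min_val = int(analysis['min'])
--
--         if not (1 <= tier <= 5):
--             return False
--
--         if not (1 <= nominal <= 100):  # Gear can have higher spawn rates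
--             return False
--
--         if not (0 <= min_val <= 30):  # Gear can have higher minimums
--             return False
--
--         return True
--     except (ValueError, TypeError):
--         return False
-- ===== SOURCE B (Python) =====
-- def validate_analysis_structure(analysis) -> bool:
--     """Validate analysis results by a single pass over the items, range-checking
--     each required key as it is first encountered, then verifying all were seen."""
--     bounds = {'tier': (1, 5), 'nominal': (1, 100), 'min': (0, 30)}
--     seen = set()
--     try:
--         for key, value in analysis.items():
--             if key in bounds and key not in seen:
--                 lo, hi = bounds[key]
--                 if not (lo <= int(value) <= hi):
--                     return False
--                 seen.add(key)
--         return all(key in seen for key in bounds)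
--     except (ValueError, TypeError):
--         return False
-- ===== Notes on version B (the rewrite author's own statement) =====
-- stated objective: alternative
-- what changed: Instead of A's three independent key lookups each followed by conversion and a range check, B makes one pass over the dict's items, range-checking each required key the first time it is encountered and accumulating a seen-set, then verifies every required key was seen.
import Mathlib
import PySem

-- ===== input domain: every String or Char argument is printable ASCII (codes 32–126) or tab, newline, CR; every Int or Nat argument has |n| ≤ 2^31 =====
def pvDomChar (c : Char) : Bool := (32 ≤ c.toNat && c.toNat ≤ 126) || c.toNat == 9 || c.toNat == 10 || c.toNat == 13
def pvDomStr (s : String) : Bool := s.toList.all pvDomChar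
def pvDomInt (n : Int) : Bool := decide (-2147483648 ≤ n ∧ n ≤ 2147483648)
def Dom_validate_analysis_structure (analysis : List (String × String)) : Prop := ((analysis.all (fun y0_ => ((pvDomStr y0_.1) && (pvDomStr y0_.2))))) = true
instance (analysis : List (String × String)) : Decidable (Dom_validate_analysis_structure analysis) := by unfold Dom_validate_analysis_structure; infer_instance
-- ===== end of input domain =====

-- B replaces A's three key-by-key lookup/convert/range checks by one pass over the items, checking each required key when first met and verifying all were seen; same return value.


-- ===== PORT A =====
-- Literal port of A: presence check for all required keys first, then the three
-- conversions (int(...) = PySem.Int.ofStr?, none = ValueError → except → False),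
-- then the three range checks in order.
def validate_analysis_structure (analysis : List (String × String)) : Bool :=
  if !((["tier", "nominal", "min"] : List String).all fun k => (analysis.lookup k).isSome) then
    false
  else
    match (analysis.lookup "tier").bind PySem.Int.ofStr? with
    | none => false  -- ValueError in int(analysis['tier'])
    | some tier =>
      match (analysis.lookup "nominal").bind PySem.Int.ofStr? with
      | none => false  -- ValueError in int(analysis['nominal'])
      | some nominal =>
        match (analysis.lookup "min").bind PySem.Int.ofStr? with
        | none => false  -- ValueError in int(analysis['min'])
        | some min_val =>
          if !(1 ≤ tier && tier ≤ 5) then false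
          else if !(1 ≤ nominal && nominal ≤ 100) then false
          else if !(0 ≤ min_val && min_val ≤ 30) then false
          else true

-- ===== PORT B =====
-- One pass over the items: on the first occurrence of a required key, convert and
-- range-check it (False on ValueError or out of range), recording it in `seen`;
-- at the end, True iff every required key was seen.
def vasBounds : List (String × (Int × Int)) :=
  [("tier", (1, 5)), ("nominal", (1, 100)), ("min", (0, 30))]

def vasScan (seen : PySem.Set String) : List (String × String) → Bool
  | [] => vasBounds.all (fun kv => PySem.Set.contains seen kv.1)
  | (key, value) :: rest =>
    match vasBounds.lookup key with
    | none => vasScan seen rest                     -- key not in bounds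
    | some (lo, hi) =>
      if PySem.Set.contains seen key then vasScan seen rest   -- key already seen
      else
        match PySem.Int.ofStr? value with
        | none => false                              -- ValueError in int(value)
        | some n =>
          if lo ≤ n && n ≤ hi then vasScan (PySem.Set.add seen key) rest
          else false

def validate_analysis_structure_alt (analysis : List (String × String)) : Bool :=
  vasScan PySem.Set.empty analysis

-- ===== PRECONDITION & SPEC =====
def Spec_validate_analysis_structure (analysis : List (String × String)) (out : Bool) : Prop := out = validate_analysis_structure_alt analysis
instance (analysis : List (String × String)) (out : Bool) : Decidable (Spec_validate_analysis_structure analysis out) := by unfold Spec_validate_analysis_structure; infer_instance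

-- ===== CLAIM (what is proved, stated in full; the proofs are below) =====
def Claim_equal_validate_analysis_structure : Prop := ∀ (analysis : List (String × String)), Dom_validate_analysis_structure analysis → Spec_validate_analysis_structure analysis (validate_analysis_structure analysis)

-- ===== LEMMAS AND PROOFS =====

-- proof helper: "first value bound to this key converts and lies in [lo, hi]"
def chk (o : Option String) (lo hi : Int) : Bool :=
  match o with
  | none => false
  | some v =>
    match PySem.Int.ofStr? v with
    | none => false
    | some n => lo ≤ n && n ≤ hi

theorem ite_chain (a b c : Bool) :
    (if !a then false else if !b then false else if !c then false else true) = (a && (b && c)) := by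
  cases a <;> cases b <;> cases c <;> rfl

-- one required-key step of the scan, shared by the three symmetric cons cases
theorem scan_step (KEY : String) (lo hi : Int) (v : String) (rest : List (String × String))
    (seen : PySem.Set String)
    (hstep : vasScan seen ((KEY, v) :: rest) =
      (if PySem.Set.contains seen KEY then vasScan seen rest
       else match PySem.Int.ofStr? v with
            | none => false
            | some n => if lo ≤ n && n ≤ hi then vasScan (PySem.Set.add seen KEY) rest else false))
    (F : PySem.Set String → Bool)
    (hF : ∀ s, vasScan s rest =
      ((PySem.Set.contains s KEY || chk (rest.lookup KEY) lo hi) && F s))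
    (hFadd : F (PySem.Set.add seen KEY) = F seen) :
    vasScan seen ((KEY, v) :: rest) =
      ((PySem.Set.contains seen KEY || chk (some v) lo hi) && F seen) := by
  rw [hstep]
  by_cases hs : KEY ∈ seen
  · have hcon : PySem.Set.contains seen KEY = true := by simp [PySem.Set.contains, hs]
    simp [hs, hF]
  · have hcon : PySem.Set.contains seen KEY = false := by simp [PySem.Set.contains, hs]
    simp only [hcon, Bool.false_eq_true, if_false]
    cases hv : PySem.Int.ofStr? v with
    | none => simp [chk, hv]
    | some n =>
      have hc : chk (some v) lo hi = (lo ≤ n && n ≤ hi) := by simp [chk, hv]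
      by_cases hr : (lo ≤ n && n ≤ hi) = true
      · have hmem : PySem.Set.contains (PySem.Set.add seen KEY) KEY = true := by
          simp only [PySem.Set.add]
          split <;> simp_all [PySem.Set.contains]
        simp only [hr, if_true, hF, hmem, hFadd]
        simp [hc, hr]
      · simp [hr, hc]

-- characterization of the scan: the result only depends on which required keys are
-- already seen and on the first value the remaining list binds to each unseen key
theorem scan_eq (l : List (String × String)) (seen : PySem.Set String) :
    vasScan seen l =
      ((PySem.Set.contains seen "tier" || chk (l.lookup "tier") 1 5) &&
       ((PySem.Set.contains seen "nominal" || chk (l.lookup "nominal") 1 100) &&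
        (PySem.Set.contains seen "min" || chk (l.lookup "min") 0 30))) := by
  induction l generalizing seen with
  | nil => simp [vasScan, vasBounds, chk]
  | cons p rest ih =>
    obtain ⟨k, v⟩ := p
    by_cases ht : k = "tier"
    · subst ht
      have h := scan_step "tier" 1 5 v rest seen rfl
        (fun s => (PySem.Set.contains s "nominal" || chk (rest.lookup "nominal") 1 100) &&
                  (PySem.Set.contains s "min" || chk (rest.lookup "min") 0 30))
        (fun s => ih s)
        (by simp only [PySem.Set.add]
            split <;> simp [PySem.Set.contains])
      rw [h]; beta_reduce
      simp [List.lookup]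
    · by_cases hn : k = "nominal"
      · subst hn
        have h := scan_step "nominal" 1 100 v rest seen rfl
          (fun s => (PySem.Set.contains s "tier" || chk (rest.lookup "tier") 1 5) &&
                    (PySem.Set.contains s "min" || chk (rest.lookup "min") 0 30))
          (fun s => by rw [ih s]; beta_reduce; cases PySem.Set.contains s "tier" <;>
                        cases PySem.Set.contains s "nominal" <;>
                        cases PySem.Set.contains s "min" <;>
                        cases chk (rest.lookup "tier") 1 5 <;>
                        cases chk (rest.lookup "nominal") 1 100 <;>
                        cases chk (rest.lookup "min") 0 30 <;> rfl)
          (by simp only [PySem.Set.add]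
              split <;> simp [PySem.Set.contains])
        rw [h]; beta_reduce
        have l1 : List.lookup "tier" (("nominal", v) :: rest) = List.lookup "tier" rest := by
          simp [List.lookup]
        have l3 : List.lookup "min" (("nominal", v) :: rest) = List.lookup "min" rest := by
          simp [List.lookup]
        rw [l1, l3, show List.lookup "nominal" (("nominal", v) :: rest) = some v from by
          simp [List.lookup]]
        cases PySem.Set.contains seen "tier" <;> cases PySem.Set.contains seen "nominal" <;>
          cases PySem.Set.contains seen "min" <;> cases chk (rest.lookup "tier") 1 5 <;>
          cases chk (some v) 1 100 <;> cases chk (rest.lookup "min") 0 30 <;> rfl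
      · by_cases hm : k = "min"
        · subst hm
          have h := scan_step "min" 0 30 v rest seen rfl
            (fun s => (PySem.Set.contains s "tier" || chk (rest.lookup "tier") 1 5) &&
                      (PySem.Set.contains s "nominal" || chk (rest.lookup "nominal") 1 100))
            (fun s => by rw [ih s]; beta_reduce; cases PySem.Set.contains s "tier" <;>
                          cases PySem.Set.contains s "nominal" <;>
                          cases PySem.Set.contains s "min" <;>
                          cases chk (rest.lookup "tier") 1 5 <;>
                          cases chk (rest.lookup "nominal") 1 100 <;>
                          cases chk (rest.lookup "min") 0 30 <;> rfl)
            (by simp only [PySem.Set.add]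
                split <;> simp [PySem.Set.contains])
          rw [h]; beta_reduce
          have l1 : List.lookup "tier" (("min", v) :: rest) = List.lookup "tier" rest := by
            simp [List.lookup]
          have l2 : List.lookup "nominal" (("min", v) :: rest) = List.lookup "nominal" rest := by
            simp [List.lookup]
          rw [l1, l2, show List.lookup "min" (("min", v) :: rest) = some v from by
            simp [List.lookup]]
          cases PySem.Set.contains seen "tier" <;> cases PySem.Set.contains seen "nominal" <;>
            cases PySem.Set.contains seen "min" <;> cases chk (rest.lookup "tier") 1 5 <;>
            cases chk (rest.lookup "nominal") 1 100 <;> cases chk (some v) 0 30 <;> rfl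
        · have h1 : (k == "tier") = false := beq_eq_false_iff_ne.mpr ht
          have h2 : (k == "nominal") = false := beq_eq_false_iff_ne.mpr hn
          have h3 : (k == "min") = false := beq_eq_false_iff_ne.mpr hm
          have g1 : ("tier" == k) = false := beq_eq_false_iff_ne.mpr (fun h => ht h.symm)
          have g2 : ("nominal" == k) = false := beq_eq_false_iff_ne.mpr (fun h => hn h.symm)
          have g3 : ("min" == k) = false := beq_eq_false_iff_ne.mpr (fun h => hm h.symm)
          have hb : vasBounds.lookup k = none := by simp [vasBounds, List.lookup, h1, h2, h3]
          simp only [vasScan, hb, List.lookup, g1, g2, g3]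
          exact ih seen

-- A's result is the same three-way conjunction of per-key checks
theorem a_eq_chk (analysis : List (String × String)) :
    validate_analysis_structure analysis =
      (chk (analysis.lookup "tier") 1 5 &&
       (chk (analysis.lookup "nominal") 1 100 &&
        chk (analysis.lookup "min") 0 30)) := by
  unfold validate_analysis_structure
  cases h1 : analysis.lookup "tier" with
  | none => simp [h1, chk]
  | some v1 =>
    cases h2 : analysis.lookup "nominal" with
    | none => simp [h2, chk]
    | some v2 =>
      cases h3 : analysis.lookup "min" with
      | none => simp [h3, chk]
      | some v3 =>
        simp only [List.all_cons, List.all_nil, h1, h2, h3, Option.isSome_some,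
          Bool.and_self, Bool.not_true, Bool.false_eq_true, if_false,
          Option.bind_some, chk]
        cases PySem.Int.ofStr? v1 with
        | none => rfl
        | some t =>
          cases PySem.Int.ofStr? v2 with
          | none => simp
          | some nm =>
            cases PySem.Int.ofStr? v3 with
            | none => simp
            | some mv => exact ite_chain _ _ _

-- ===== VERDICT (by name: the statement is the Claim_ definition above) =====
theorem validate_analysis_structure_spec : Claim_equal_validate_analysis_structure := by
  intro analysis _
  unfold Spec_validate_analysis_structure validate_analysis_structure_alt
  rw [a_eq_chk, scan_eq]
  simp [PySem.Set.empty, PySem.Set.contains]
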